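-- pv_equiv track=rewrite | github.com/soyukke/lean-unsolved | scripts/collatz_padic_periodic.py | find_all_periodic_mod
-- ===== SOURCE A (Python) =====
-- def v2(n):
--     """n の2-adic valuation"""
--     if n == 0:
--         return float('inf')
--     count = 0
--     while n % 2 == 0:
--         n //= 2
--         count += 1
--     return count
--
-- def find_all_periodic_mod(k, max_period=20):
--     """mod 2^k で全ての周期点を見つける"""
--     mod = 1 << k
--     # period p の周期点: T^p(n) ≡ n (mod 2^k) なる奇数 n
--     periodic = {}  # period -> set of cycle elements
--
--     for r in range(1, mod, 2):
--         x = r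
--         orbit = [x]
--         for step in range(1, max_period + 1):
--             val = 3 * x + 1
--             v = v2(val)
--             x = (val >> v) % mod
--             # 結果が偶数になった場合は奇数部分を取る
--             while x % 2 == 0 and x > 0:
--                 x >>= 1
--             x = x % mod
--             if x == 0:
--                 break
--             if x == r:
--                 # 周期 step のサイクル発見
--                 p = step
--                 cycle = frozenset(orbit)
--                 if p not in periodic:
--                     periodic[p] = []
--                 if cycle not in [frozenset(c) for c in periodic[p]]:
--                     periodic[p].append(orbit[:])
--                 break
--             orbit.append(x)
--
--     return periodic
-- ===== SOURCE B (Python) =====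
-- def find_all_periodic_mod(k, max_period=20):
--     """mod 2^k: record each cycle once, keyed by its minimal period,
--     via its smallest element (no frozenset dedup, no walk-with-break)."""
--     mod = 1 << k
--
--     def odd(n):
--         """largest odd divisor (0 stays 0), recursively"""
--         return odd(n >> 1) if n and n % 2 == 0 else n
--
--     periodic = {}
--     for r in range(1, mod, 2):
--         # the first max_period iterates of r, computed up front
--         traj, x = [], r
--         for _ in range(max_period):
--             x = odd(odd(3 * x + 1) % mod) % mod
--             traj.append(x)
--         if r in traj:
--             p = traj.index(r) + 1            # minimal period of r
--             orbit = [r] + traj[:p - 1]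
--             if min(orbit) == r:              # exactly one record per cycle
--                 periodic.setdefault(p, []).append(orbit)
--     return periodic
-- ===== Notes on version B (the rewrite author's own statement) =====
-- stated objective: alternative
-- what changed: B drops A's walk-with-break and frozenset-against-the-dict dedup: it computes the fixed-length iterate trajectory up front, reads the minimal period off it with list.index, and records a cycle exactly once by the arithmetic criterion 'r is the smallest element of its orbit' instead of scanning the stored cycles for a set-equal one.
import Mathlib
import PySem

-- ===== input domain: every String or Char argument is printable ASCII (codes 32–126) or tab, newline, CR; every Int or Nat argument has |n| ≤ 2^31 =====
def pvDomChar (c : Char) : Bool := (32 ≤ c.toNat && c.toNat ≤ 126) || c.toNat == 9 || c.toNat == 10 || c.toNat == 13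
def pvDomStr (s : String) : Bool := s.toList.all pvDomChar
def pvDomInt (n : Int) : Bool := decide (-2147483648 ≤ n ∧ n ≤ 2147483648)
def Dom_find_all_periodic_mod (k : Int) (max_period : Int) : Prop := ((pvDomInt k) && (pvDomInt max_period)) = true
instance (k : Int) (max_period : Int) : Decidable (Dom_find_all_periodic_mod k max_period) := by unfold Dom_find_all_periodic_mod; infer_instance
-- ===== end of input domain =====

-- B replaces A's walk-with-break and frozenset-against-the-dict dedup by a staged pass:
-- the fixed-length iterate trajectory is computed up front, the minimal period is read off
-- with list.index, and each cycle is recorded exactly once by the criterion "r is the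
-- smallest element of its orbit" (no scan over the stored cycles); alternative
-- decomposition, same results.

-- frozenset(a) == frozenset(b): equality as finite sets of Int
-- (A's `frozenset(c) == frozenset(orbit)` comparison)
def pvSetEq (a b : List Int) : Bool := a.all (fun x => b.contains x) && b.all (fun x => a.contains x)

-- ===== PORT A =====

-- A's v2(n): count of trailing 2-factors; Python returns float('inf') at n = 0 (that call is
-- unreachable: the argument is always 3*x+1 ≥ 1); the `n ≠ 0` guard is for termination only,
-- exact for every n the program reaches.
def pvV2 (n : Int) : Int :=
  if h : n ≠ 0 ∧ PySem.Int.mod n 2 = 0 then 1 + pvV2 (PySem.Int.floordiv n 2) else 0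
termination_by n.natAbs
decreasing_by
  rcases h with ⟨h0, h2⟩
  have hd := PySem.Int.floordiv_mul_add_mod n 2
  rw [h2] at hd
  omega

-- A's `while x % 2 == 0 and x > 0: x >>= 1`
def pvStripA (x : Int) : Int :=
  if h : PySem.Int.mod x 2 = 0 ∧ x > 0 then pvStripA (PySem.Int.floordiv x 2) else x
termination_by x.natAbs
decreasing_by
  rcases h with ⟨h2, h0⟩
  have hd := PySem.Int.floordiv_mul_add_mod x 2
  rw [h2] at hd
  omega

-- one iteration of A's inner for-body up to the break tests:
-- val = 3*x+1; v = v2(val); x = (val >> v) % m; strip; x = x % m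
def pvStepA (m x : Int) : Int :=
  let val := 3 * x + 1
  let v := pvV2 val
  let x1 := PySem.Int.mod (PySem.Int.floordiv val (2 ^ v.toNat)) m  -- val >> v (v ≥ 0 always)
  PySem.Int.mod (pvStripA x1) m

-- A's cycle recording: `if p not in periodic: …; if cycle not in […]: append`
def pvRecordA (periodic : PySem.Dict Int (List (List Int))) (p : Int) (orbit : List Int) :
    PySem.Dict Int (List (List Int)) :=
  let d1 := if periodic.contains p then periodic else periodic.insert p []
  let cur := d1.getD p []
  if cur.any (fun c => pvSetEq c orbit) then d1 else d1.insert p (cur ++ [orbit])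

-- A's `for step in range(1, max_period+1)` with its breaks
def pvLoopA (m r : Int) (steps : List Int) (x : Int) (orbit : List Int)
    (periodic : PySem.Dict Int (List (List Int))) : PySem.Dict Int (List (List Int)) :=
  match steps with
  | [] => periodic
  | step :: rest =>
    let x' := pvStepA m x
    if x' = 0 then periodic
    else if x' = r then pvRecordA periodic step orbit
    else pvLoopA m r rest x' (orbit ++ [x']) periodic

def find_all_periodic_mod (k : Int) (max_period : Int) : List (Int × List (List Int)) :=
  let m : Int := (2 : Int) ^ k.toNat  -- 1 << k; Python raises on k < 0 (outside Pre_)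
  ((PySem.List.pyRange 1 m 2).foldl
      (fun periodic r => pvLoopA m r (PySem.List.pyRange 1 (max_period + 1) 1) r [r] periodic)
      PySem.Dict.empty).items

-- ===== PORT B =====

-- B's odd(n): largest odd divisor, recursively (`odd(n >> 1) if n and n % 2 == 0 else n`)
def pvOddPart (n : Int) : Int :=
  if h : n ≠ 0 ∧ PySem.Int.mod n 2 = 0 then pvOddPart (PySem.Int.floordiv n 2) else n
termination_by n.natAbs
decreasing_by
  rcases h with ⟨h0, h2⟩
  have hd := PySem.Int.floordiv_mul_add_mod n 2
  rw [h2] at hd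
  omega

-- B's per-step update: odd(odd(3*x+1) % mod) % mod
def pvStepB (m x : Int) : Int :=
  PySem.Int.mod (pvOddPart (PySem.Int.mod (pvOddPart (3 * x + 1)) m)) m

-- B's trajectory loop: `for _ in range(max_period): x = …; traj.append(x)`
def pvTrajB (m : Int) (n : Nat) (x : Int) (traj : List Int) : List Int :=
  match n with
  | 0 => traj
  | n + 1 =>
    let x' := pvStepB m x
    pvTrajB m n x' (traj ++ [x'])

-- B's loop body over one odd residue r (trajectory, index, min-representative record)
def pvBodyB (m mp : Int) (periodic : PySem.Dict Int (List (List Int))) (r : Int) :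
    PySem.Dict Int (List (List Int)) :=
  let traj := pvTrajB m mp.toNat r []
  if traj.contains r then
    match PySem.List.index? traj r with
    | some i =>
      let p : Int := (i : Int) + 1                              -- traj.index(r) + 1
      let orbit := r :: PySem.List.slice traj none (some (p - 1))  -- [r] + traj[:p-1]
      if PySem.List.min? orbit (fun v => v) = some r then
        -- periodic.setdefault(p, []).append(orbit)
        let d1 := periodic.setdefault p []
        d1.insert p (d1.getD p [] ++ [orbit])
      else periodic
    | none => periodic  -- unreachable: `r in traj` holds here
  else periodic

def find_all_periodic_mod_alt (k : Int) (max_period : Int) : List (Int × List (List Int)) :=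
  let m : Int := (2 : Int) ^ k.toNat  -- 1 << k; Python raises on k < 0 (outside Pre_)
  ((PySem.List.pyRange 1 m 2).foldl (pvBodyB m max_period) PySem.Dict.empty).items

-- ===== PRECONDITION & SPEC =====
-- Pre_ excludes k < 0, on which Python's `1 << k` raises ValueError in both A and B.
def Pre_find_all_periodic_mod (k : Int) (max_period : Int) : Prop := 0 ≤ k
instance (k : Int) (max_period : Int) : Decidable (Pre_find_all_periodic_mod k max_period) := by
  unfold Pre_find_all_periodic_mod; infer_instance

def pvWitness_find_all_periodic_mod : Int × Int := (3, 5)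

def Spec_find_all_periodic_mod (k : Int) (max_period : Int) (out : List (Int × List (List Int))) : Prop := out = find_all_periodic_mod_alt k max_period
instance (k : Int) (max_period : Int) (out : List (Int × List (List Int))) : Decidable (Spec_find_all_periodic_mod k max_period out) := by unfold Spec_find_all_periodic_mod; infer_instance

-- ===== CLAIM (what is proved, stated in full; the proofs are below) =====
def Claim_equal_find_all_periodic_mod : Prop := ∀ (k : Int) (max_period : Int), Dom_find_all_periodic_mod k max_period → Pre_find_all_periodic_mod k max_period → Spec_find_all_periodic_mod k max_period (find_all_periodic_mod k max_period)

-- ===== LEMMAS AND PROOFS =====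

-- the step map, iterated
def pvF (m : Int) : Int → Int := fun x => pvStepB m x

-- the orbit [r, F r, …, F^(p-1) r]
def pvOrb (m : Int) (p : Nat) (r : Int) : List Int :=
  (List.range p).map (fun i => (pvF m)^[i] r)

-- the trajectory suffix [F^(t+1) r, …, F^(t+n) r]
def pvTraj (m : Int) (t n : Nat) (r : Int) : List Int :=
  (List.range n).map (fun i => (pvF m)^[t + i + 1] r)

-- "s is the recorded representative of a cycle of minimal period p ≤ mp"
def pvRep (m mp : Int) (s : Int) (p : Nat) : Prop :=
  1 ≤ s ∧ s < m ∧ s % 2 = 1 ∧ 1 ≤ p ∧ p ≤ mp.toNat ∧ (pvF m)^[p] s = s ∧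
  (∀ q : Nat, 1 ≤ q → q < p → (pvF m)^[q] s ≠ s) ∧ (∀ j : Nat, j < p → s ≤ (pvF m)^[j] s)

-- the dict accumulated after processing all odd residues < r0
def pvInv (m mp : Int) (d : PySem.Dict Int (List (List Int))) (r0 : Int) : Prop :=
  (∀ (pI : Int) (c : List Int), c ∈ d.getD pI [] →
      ∃ s p, pvRep m mp s p ∧ s < r0 ∧ pI = (p : Int) ∧ c = pvOrb m p s) ∧
  (∀ (s : Int) (p : Nat), pvRep m mp s p → s < r0 → pvOrb m p s ∈ d.getD (p : Int) [])

theorem pvV2_nonneg (n : Int) : 0 ≤ pvV2 n := by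
  induction n using pvV2.induct with
  | case1 n h ih => rw [pvV2, dif_pos h]; omega
  | case2 n h => rw [pvV2, dif_neg h]

theorem pvStripA_eq_oddPart (x : Int) (hx : 0 ≤ x) : pvStripA x = pvOddPart x := by
  induction x using pvStripA.induct with
  | case1 x h ih =>
    rcases h with ⟨h2, h0⟩
    have hd := PySem.Int.floordiv_mul_add_mod x 2
    rw [h2] at hd
    rw [pvStripA, dif_pos ⟨h2, h0⟩, pvOddPart, dif_pos ⟨by omega, h2⟩]
    exact ih (by omega)
  | case2 x h =>
    rw [pvStripA, dif_neg h, pvOddPart]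
    rw [dif_neg]
    intro ⟨h0, h2⟩
    exact h ⟨h2, by omega⟩

theorem pvShift_v2_eq_oddPart (n : Int) (hn : 0 < n) :
    PySem.Int.floordiv n (2 ^ (pvV2 n).toNat) = pvOddPart n := by
  induction n using pvV2.induct with
  | case1 n h ih =>
    rcases h with ⟨h0, h2⟩
    have hd := PySem.Int.floordiv_mul_add_mod n 2
    rw [h2] at hd
    have hpos : 0 < PySem.Int.floordiv n 2 := by omega
    have hv := pvV2_nonneg (PySem.Int.floordiv n 2)
    rw [pvV2, dif_pos ⟨h0, h2⟩, pvOddPart, dif_pos ⟨h0, h2⟩]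
    rw [← ih hpos]
    have htn : (1 + pvV2 (PySem.Int.floordiv n 2)).toNat
        = (pvV2 (PySem.Int.floordiv n 2)).toNat + 1 := by omega
    rw [htn, pow_succ]
    rw [PySem.Int.floordiv_eq_ediv_of_pos (by positivity),
        PySem.Int.floordiv_eq_ediv_of_pos (by positivity),
        PySem.Int.floordiv_eq_ediv_of_pos (by norm_num)]
    rw [mul_comm ((2:Int) ^ _) 2, ← Int.ediv_ediv_eq_ediv_mul (by norm_num)]
  | case2 n h =>
    rw [pvV2, dif_neg h, pvOddPart, dif_neg h]
    simp [PySem.Int.floordiv_eq_ediv_of_pos]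

-- A's inline step equals B's fused step
theorem pvStepA_eq_pvStepB (m x : Int) (hm : 0 < m) (hx : 0 ≤ x) :
    pvStepA m x = pvStepB m x := by
  show PySem.Int.mod (pvStripA (PySem.Int.mod
      (PySem.Int.floordiv (3 * x + 1) (2 ^ (pvV2 (3 * x + 1)).toNat)) m)) m = _
  rw [pvShift_v2_eq_oddPart (3 * x + 1) (by omega)]
  rw [pvStripA_eq_oddPart _ (PySem.Int.mod_nonneg _ hm)]
  rfl

-- odd part of a positive number: positive, odd, no larger
theorem pvOddPart_props (n : Int) (hn : 0 < n) :
    0 < pvOddPart n ∧ pvOddPart n % 2 = 1 ∧ pvOddPart n ≤ n := by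
  induction n using pvOddPart.induct with
  | case1 n h ih =>
    rcases h with ⟨h0, h2⟩
    have hd := PySem.Int.floordiv_mul_add_mod n 2
    have hm2 : PySem.Int.mod n 2 = n % 2 := PySem.Int.mod_eq_emod_of_pos (by norm_num)
    rw [h2] at hd
    rw [pvOddPart, dif_pos ⟨h0, h2⟩]
    have := ih (by omega)
    exact ⟨this.1, this.2.1, by omega⟩
  | case2 n h =>
    rw [pvOddPart, dif_neg h]
    have hm2 : PySem.Int.mod n 2 = n % 2 := PySem.Int.mod_eq_emod_of_pos (by norm_num)
    have : ¬(n ≠ 0 ∧ PySem.Int.mod n 2 = 0) := h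
    refine ⟨hn, ?_, le_refl n⟩
    omega

-- one B step from a nonnegative input: in [1, m), odd  (m even, m ≥ 2)
theorem pvStepB_props (m x : Int) (hm : 2 ≤ m) (hme : (2:Int) ∣ m) (hx : 0 ≤ x) :
    1 ≤ pvStepB m x ∧ pvStepB m x < m ∧ pvStepB m x % 2 = 1 := by
  have hm0 : 0 < m := by omega
  have h1 := pvOddPart_props (3 * x + 1) (by omega)
  have h2a := PySem.Int.mod_nonneg (pvOddPart (3 * x + 1)) hm0
  have h2b := PySem.Int.mod_lt (pvOddPart (3 * x + 1)) hm0
  have h2odd : PySem.Int.mod (pvOddPart (3 * x + 1)) m % 2 = 1 := by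
    rw [PySem.Int.mod_eq_emod_of_pos hm0, Int.emod_emod_of_dvd _ hme]
    exact h1.2.1
  have h2pos : 0 < PySem.Int.mod (pvOddPart (3 * x + 1)) m := by omega
  have h3 := pvOddPart_props (PySem.Int.mod (pvOddPart (3 * x + 1)) m) h2pos
  have hfin : PySem.Int.mod (pvOddPart (PySem.Int.mod (pvOddPart (3 * x + 1)) m)) m
      = pvOddPart (PySem.Int.mod (pvOddPart (3 * x + 1)) m) := by
    rw [PySem.Int.mod_eq_emod_of_pos hm0]
    exact Int.emod_eq_of_lt (by omega) (by omega)
  unfold pvStepB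
  rw [hfin]
  exact ⟨by omega, by omega, h3.2.1⟩

-- iterates of an odd residue stay odd residues in [1, m)
theorem pvIter_props (m : Int) (hm : 2 ≤ m) (hme : (2:Int) ∣ m) (r : Int)
    (hr : 1 ≤ r ∧ r < m ∧ r % 2 = 1) :
    ∀ j : Nat, 1 ≤ (pvF m)^[j] r ∧ (pvF m)^[j] r < m ∧ (pvF m)^[j] r % 2 = 1 := by
  intro j
  induction j with
  | zero => simpa using hr
  | succ j ih =>
    rw [Function.iterate_succ_apply']
    exact pvStepB_props m _ hm hme (by omega)

theorem pvOrb_one (m : Int) (r : Int) : pvOrb m 1 r = [r] := by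
  simp [pvOrb]

theorem pvOrb_succ (m : Int) (p : Nat) (r : Int) :
    pvOrb m (p + 1) r = pvOrb m p r ++ [(pvF m)^[p] r] := by
  simp [pvOrb, List.range_succ]

theorem mem_pvOrb (m : Int) (p : Nat) (r x : Int) :
    x ∈ pvOrb m p r ↔ ∃ j : Nat, j < p ∧ (pvF m)^[j] r = x := by
  simp [pvOrb, List.mem_map, List.mem_range]
  tauto

theorem pvSetEq_iff (a b : List Int) :
    pvSetEq a b = true ↔ ∀ x : Int, x ∈ a ↔ x ∈ b := by
  simp only [pvSetEq, Bool.and_eq_true, List.all_eq_true]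
  constructor
  · rintro ⟨h1, h2⟩ x
    constructor
    · intro hx; simpa using h1 x hx
    · intro hx; simpa using h2 x hx
  · intro h
    constructor
    · intro x hx; simpa using (h x).mp hx
    · intro x hx; simpa using (h x).mpr hx

-- B's trajectory loop builds the iterate list
theorem pvTrajB_eq (m : Int) (n : Nat) :
    ∀ (x : Int) (acc : List Int),
      pvTrajB m n x acc = acc ++ (List.range n).map (fun i => (pvF m)^[i + 1] x) := by
  induction n with
  | zero => intro x acc; simp [pvTrajB]
  | succ n ih =>
    intro x acc
    rw [pvTrajB]
    rw [ih]
    rw [List.range_succ_eq_map]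
    simp only [List.map_cons, List.map_map]
    rw [List.append_assoc]
    refine congrArg (acc ++ ·) ?_
    rw [List.singleton_append]
    refine congrArg₂ List.cons rfl ?_
    apply List.map_congr_left
    intro i _
    exact (Function.iterate_succ_apply (pvF m) (i + 1) x).symm

theorem pvTraj_zero_eq (m : Int) (n : Nat) (r : Int) :
    pvTrajB m n r [] = pvTraj m 0 n r := by
  rw [pvTrajB_eq]
  simp [pvTraj]

theorem pvTraj_cons (m : Int) (t u : Nat) (r : Int) :
    pvTraj m t (u + 1) r = (pvF m)^[t + 1] r :: pvTraj m (t + 1) u r := by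
  rw [pvTraj, List.range_succ_eq_map]
  simp only [List.map_cons, List.map_map]
  congr 1
  apply List.map_congr_left
  intro i _
  simp only [Function.comp]
  congr 1
  omega

theorem pvTraj_getElem (m : Int) (t n : Nat) (r : Int) (j : Nat) (hj : j < n) :
    (pvTraj m t n r)[j]'(by simp [pvTraj]; omega) = (pvF m)^[t + j + 1] r := by
  simp [pvTraj]

-- iterate rotation facts
theorem pvIter_period_mul (f : Int → Int) (r : Int) (p : Nat) (hp : f^[p] r = r) :
    ∀ n : Nat, f^[n * p] r = r := by
  intro n
  induction n with
  | zero => simp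
  | succ n ih => rw [Nat.succ_mul, Function.iterate_add_apply, hp, ih]

theorem pvIter_reduce (f : Int → Int) (r : Int) (p : Nat) (hp0 : 0 < p)
    (hp : f^[p] r = r) (a : Nat) : f^[a] r = f^[a % p] r := by
  conv_lhs => rw [show a = a % p + (a / p) * p from (Nat.mod_add_div' a p).symm]
  rw [Function.iterate_add_apply, pvIter_period_mul f r p hp]

-- conjugation: a point on the cycle has the same period and the same orbit set
theorem pvRot_fix (f : Int → Int) (r s : Int) (p i : Nat) (hp : f^[p] r = r)
    (hi : s = f^[i] r) : f^[p] s = s := by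
  subst hi
  rw [← Function.iterate_add_apply, Nat.add_comm, Function.iterate_add_apply, hp]

theorem pvRot_back (f : Int → Int) (r s : Int) (p i : Nat) (hip : i ≤ p)
    (hp : f^[p] r = r) (hi : s = f^[i] r) : f^[p - i] s = r := by
  subst hi
  rw [← Function.iterate_add_apply]
  rw [show p - i + i = p by omega, hp]

theorem pvRot_min_transfer (f : Int → Int) (r s : Int) (p i q : Nat) (hip : i ≤ p)
    (hp : f^[p] r = r) (hi : s = f^[i] r) (hq : f^[q] s = s) : f^[q] r = r := by
  have hb := pvRot_back f r s p i hip hp hi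
  calc f^[q] r = f^[q] (f^[p - i] s) := by rw [hb]
    _ = f^[p - i] (f^[q] s) := by
        rw [← Function.iterate_add_apply, Nat.add_comm, Function.iterate_add_apply]
    _ = r := by rw [hq, hb]

theorem pvOrb_set_eq (m : Int) (r s : Int) (p i : Nat) (hp0 : 0 < p) (hi : i < p)
    (hpr : (pvF m)^[p] r = r) (his : s = (pvF m)^[i] r) :
    ∀ x : Int, x ∈ pvOrb m p s ↔ x ∈ pvOrb m p r := by
  intro x
  have hps : (pvF m)^[p] s = s := pvRot_fix (pvF m) r s p i hpr his
  have hback : (pvF m)^[p - i] s = r := pvRot_back (pvF m) r s p i (by omega) hpr his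
  rw [mem_pvOrb, mem_pvOrb]
  constructor
  · rintro ⟨j, hj, rfl⟩
    refine ⟨(j + i) % p, Nat.mod_lt _ hp0, ?_⟩
    rw [← pvIter_reduce (pvF m) r p hp0 hpr (j + i), Function.iterate_add_apply, ← his]
  · rintro ⟨j, hj, rfl⟩
    refine ⟨(j + (p - i)) % p, Nat.mod_lt _ hp0, ?_⟩
    rw [← pvIter_reduce (pvF m) s p hp0 hps (j + (p - i)), Function.iterate_add_apply, hback]

-- Python min(x :: t) = x iff x is a lower bound
theorem pvFoldlMin_eq_self (t : List Int) (x : Int) (h : ∀ y ∈ t, x ≤ y) :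
    t.foldl min x = x := by
  induction t generalizing x with
  | nil => rfl
  | cons a t ih =>
    simp only [List.foldl_cons]
    rw [min_eq_left (h a (by simp))]
    exact ih x (fun y hy => h y (by simp [hy]))

theorem pvMin_cons_iff (x : Int) (t : List Int) :
    (PySem.List.min? (x :: t) (fun v => v) = some x) ↔ ∀ y ∈ t, x ≤ y := by
  constructor
  · intro h y hy
    exact PySem.List.min?_isMin h y (by simp [hy])
  · intro h
    rw [PySem.List.min?_id_cons, pvFoldlMin_eq_self t x h]

-- step 2 range: induction forms
theorem pvRange2_nil (a b : Int) (h : b ≤ a) : PySem.List.pyRange a b 2 = [] := by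
  rw [PySem.List.pyRange_of_pos a b (by norm_num)]
  simp [show ¬(a < b) by omega]

theorem pvRange2_cons (a b : Int) (h : a < b) :
    PySem.List.pyRange a b 2 = a :: PySem.List.pyRange (a + 2) b 2 := by
  rw [PySem.List.pyRange_of_pos a b (by norm_num),
      PySem.List.pyRange_of_pos (a + 2) b (by norm_num)]
  by_cases h2 : a + 2 < b
  · rw [if_pos h, if_pos h2]
    have hN : ((b - a + 2 - 1) / 2).toNat = ((b - (a + 2) + 2 - 1) / 2).toNat + 1 := by
      have : b - a + 2 - 1 = (b - (a + 2) + 2 - 1) + 1 * 2 := by ring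
      rw [this, Int.add_mul_ediv_right _ _ (by norm_num)]
      have : (0:Int) ≤ (b - (a + 2) + 2 - 1) / 2 := Int.ediv_nonneg (by omega) (by norm_num)
      omega
    rw [hN, List.range_succ_eq_map]
    simp only [List.map_cons, List.map_map]
    congr 1
    · simp
    · apply List.map_congr_left
      intro i _
      simp only [Function.comp]
      push_cast
      ring
  · rw [if_pos h, if_neg h2]
    have hN : ((b - a + 2 - 1) / 2).toNat = 1 := by
      have h1 : b - a + 2 - 1 = (b - a + 1) := by ring
      have hlo : 2 ≤ b - a + 1 := by omega
      have hhi : b - a + 1 ≤ 3 := by omega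
      have := Int.ediv_le_ediv (by norm_num : (0:Int) < 2) hhi
      have := Int.ediv_le_ediv (by norm_num : (0:Int) < 2) hlo
      omega
    rw [hN]
    simp

-- ===== the A-side loop characterisation =====
-- A's for-loop from step t+1 with orbit pvOrb (t+1) equals: find the first return in the
-- remaining trajectory and record it (A's x == 0 break never fires: iterates are ≥ 1).
theorem pvLoopA_char (m mp : Int) (hm : 2 ≤ m) (hme : (2:Int) ∣ m) (r : Int)
    (hr : 1 ≤ r ∧ r < m ∧ r % 2 = 1) :
    ∀ (n t : Nat) (d : PySem.Dict Int (List (List Int))), mp.toNat - t = n →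
      pvLoopA m r (PySem.List.pyRange ((t:Int) + 1) (mp + 1) 1) ((pvF m)^[t] r)
          (pvOrb m (t + 1) r) d
        = match PySem.List.index? (pvTraj m t n r) r with
          | some j => pvRecordA d ((t + j + 1 : Nat) : Int) (pvOrb m (t + j + 1) r)
          | none => d := by
  intro n
  induction n with
  | zero =>
    intro t d hn
    have hmp : mp ≤ (t : Int) := le_trans (Int.self_le_toNat mp)
      (by exact_mod_cast Nat.le_of_sub_eq_zero hn)
    rw [PySem.List.pyRange_one_eq_nil (by omega)]
    have htraj : pvTraj m t 0 r = [] := by simp [pvTraj]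
    rw [htraj]
    rfl
  | succ n ih =>
    intro t d hn
    have htlt : t < mp.toNat := by omega
    have htmp : (t : Int) + 1 ≤ mp := by omega
    rw [PySem.List.pyRange_one_cons (by omega)]
    have hx := pvIter_props m hm hme r hr t
    have hx' := pvIter_props m hm hme r hr (t + 1)
    have hstep : pvStepA m ((pvF m)^[t] r) = (pvF m)^[t + 1] r := by
      rw [pvStepA_eq_pvStepB m _ (by omega) (by omega)]
      rw [Function.iterate_succ_apply']
      rfl
    rw [pvTraj_cons]
    show (let x' := pvStepA m ((pvF m)^[t] r);
          if x' = 0 then d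
          else if x' = r then pvRecordA d ((t:Int) + 1) (pvOrb m (t + 1) r)
          else pvLoopA m r (PySem.List.pyRange ((t:Int) + 1 + 1) (mp + 1) 1) x'
                 (pvOrb m (t + 1) r ++ [x']) d) = _
    simp only [hstep]
    rw [if_neg (by omega)]
    by_cases hxr : (pvF m)^[t + 1] r = r
    · rw [if_pos hxr, hxr, PySem.List.index?_cons_self]
      show pvRecordA d ((t:Int) + 1) (pvOrb m (t + 1) r)
          = pvRecordA d ((t + 0 + 1 : Nat) : Int) (pvOrb m (t + 0 + 1) r)
      norm_num
    · rw [if_neg hxr]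
      have hrec : pvLoopA m r (PySem.List.pyRange ((t:Int) + 1 + 1) (mp + 1) 1)
            ((pvF m)^[t + 1] r) (pvOrb m (t + 1) r ++ [(pvF m)^[t + 1] r]) d
          = match PySem.List.index? (pvTraj m (t + 1) n r) r with
            | some j => pvRecordA d ((t + 1 + j + 1 : Nat) : Int) (pvOrb m (t + 1 + j + 1) r)
            | none => d := by
        rw [← pvOrb_succ]
        have h2 := ih (t + 1) d (by omega)
        push_cast at h2 ⊢
        exact h2
      rw [hrec, PySem.List.index?_cons_of_ne _ hxr]
      cases hidx : PySem.List.index? (pvTraj m (t + 1) n r) r with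
      | none => simp [hidx]
      | some j =>
        simp only [hidx, Option.map_some]
        show pvRecordA d ((t + 1 + j + 1 : Nat) : Int) (pvOrb m (t + 1 + j + 1) r)
            = pvRecordA d ((t + (j + 1) + 1 : Nat) : Int) (pvOrb m (t + (j + 1) + 1) r)
        congr 2 <;> omega

theorem pvTraj_length (m : Int) (t n : Nat) (r : Int) : (pvTraj m t n r).length = n := by
  simp [pvTraj]

theorem mem_pvTraj (m : Int) (n : Nat) (r x : Int) :
    x ∈ pvTraj m 0 n r ↔ ∃ j : Nat, j < n ∧ (pvF m)^[j + 1] r = x := by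
  simp only [pvTraj, List.mem_map, List.mem_range, Nat.zero_add]

-- what a successful index? on the trajectory means: first return at step i+1
theorem pvIndex_facts (m mp : Int) (r : Int) (i : Nat)
    (h : PySem.List.index? (pvTraj m 0 mp.toNat r) r = some i) :
    i < mp.toNat ∧ (pvF m)^[i + 1] r = r ∧
      ∀ q : Nat, 1 ≤ q → q < i + 1 → (pvF m)^[q] r ≠ r := by
  obtain ⟨hk, heq, hprev⟩ := PySem.List.getElem_of_index?_eq_some h
  have hlen : i < mp.toNat := by
    have := pvTraj_length m 0 mp.toNat r
    omega
  refine ⟨hlen, ?_, ?_⟩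
  · have hel := pvTraj_getElem m 0 mp.toNat r i hlen
    rw [heq] at hel
    rw [show 0 + i + 1 = i + 1 by omega] at hel
    exact hel.symm
  · intro q hq1 hqi heqq
    have hj : q - 1 < i := by omega
    have hel := pvTraj_getElem m 0 mp.toNat r (q - 1) (by omega)
    rw [show 0 + (q - 1) + 1 = q by omega] at hel
    exact hprev (q - 1) hj (by rw [hel, heqq])

theorem pvOrb_cons (m : Int) (i : Nat) (r : Int) :
    pvOrb m (i + 1) r = r :: (List.range i).map (fun j => (pvF m)^[j + 1] r) := by
  rw [pvOrb, List.range_succ_eq_map]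
  simp only [List.map_cons, List.map_map, Function.iterate_zero, id]
  rfl

-- B's `[r] + traj[:p-1]` is the orbit
theorem pvOrbB_eq (m mp : Int) (r : Int) (i : Nat) (hlen : i < mp.toNat) :
    r :: PySem.List.slice (pvTraj m 0 mp.toNat r) none (some ((i:Int) + 1 - 1))
      = pvOrb m (i + 1) r := by
  rw [show ((i:Int) + 1 - 1) = (i:Int) by ring]
  rw [PySem.List.slice_to _ (by positivity)]
  rw [Int.toNat_natCast]
  rw [pvOrb_cons]
  congr 1
  rw [pvTraj, ← List.map_take, List.take_range, Nat.min_eq_left (Nat.le_of_lt hlen)]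
  apply List.map_congr_left
  intro j hj
  rw [List.mem_range] at hj
  congr 1
  omega

theorem pvOrb_ne_nil (m : Int) (i : Nat) (r : Int) : pvOrb m (i + 1) r ≠ [] := by
  simp [pvOrb]

theorem pvOrb_self_mem (m : Int) (i : Nat) (r : Int) : r ∈ pvOrb m (i + 1) r := by
  rw [mem_pvOrb]
  exact ⟨0, by omega, rfl⟩

-- building a representative: any minimal element of a found cycle satisfies pvRep
theorem pvRep_of_min (m mp : Int) (hm : 2 ≤ m) (hme : (2:Int) ∣ m) (r : Int)
    (hr : 1 ≤ r ∧ r < m ∧ r % 2 = 1) (i : Nat)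
    (hlen : i < mp.toNat) (hret : (pvF m)^[i + 1] r = r)
    (hminimal : ∀ q : Nat, 1 ≤ q → q < i + 1 → (pvF m)^[q] r ≠ r)
    (x : Int) (j0 : Nat) (hj0 : j0 < i + 1) (hx : x = (pvF m)^[j0] r)
    (hlow : ∀ y ∈ pvOrb m (i + 1) r, x ≤ y) :
    pvRep m mp x (i + 1) := by
  have hprops := pvIter_props m hm hme r hr j0
  refine ⟨by omega, by omega, by rw [hx]; exact hprops.2.2, by omega, by omega,
    pvRot_fix (pvF m) r x (i + 1) j0 hret hx, ?_, ?_⟩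
  · intro q hq1 hqlt heq
    exact hminimal q hq1 hqlt
      (pvRot_min_transfer (pvF m) r x (i + 1) j0 q (by omega) hret hx heq)
  · intro j hj
    refine hlow _ ?_
    refine (pvOrb_set_eq m r x (i + 1) j0 (by omega) hj0 hret hx _).mp ?_
    rw [mem_pvOrb]
    exact ⟨j, hj, rfl⟩

-- the minimal period is unique
theorem pvRep_unique (m mp : Int) (r : Int) (i : Nat) (p' : Nat)
    (hret : (pvF m)^[i + 1] r = r)
    (hminimal : ∀ q : Nat, 1 ≤ q → q < i + 1 → (pvF m)^[q] r ≠ r)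
    (hrep : pvRep m mp r p') : p' = i + 1 := by
  obtain ⟨-, -, -, hp1, -, hfix, hmin, -⟩ := hrep
  by_contra hne
  rcases lt_or_gt_of_ne hne with hlt | hgt
  · exact hminimal p' hp1 (by omega) hfix
  · exact hmin (i + 1) (by omega) (by omega) hret

-- B's body, written as a match on the trajectory search
theorem pvBodyB_char (m mp : Int) (d : PySem.Dict Int (List (List Int))) (r : Int) :
    pvBodyB m mp d r
      = match PySem.List.index? (pvTraj m 0 mp.toNat r) r with
        | some i =>
          if PySem.List.min? (pvOrb m (i + 1) r) (fun v => v) = some r then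
            (d.setdefault ((i:Int) + 1) []).insert ((i:Int) + 1)
              ((d.setdefault ((i:Int) + 1) []).getD ((i:Int) + 1) [] ++ [pvOrb m (i + 1) r])
          else d
        | none => d := by
  cases hidx : PySem.List.index? (pvTraj m 0 mp.toNat r) r with
  | none =>
    have hmem : r ∉ pvTraj m 0 mp.toNat r := (PySem.List.index?_eq_none_iff _ _).mp hidx
    have hcon : (pvTraj m 0 mp.toNat r).contains r = false := by simpa using hmem
    simp only [pvBodyB, pvTraj_zero_eq, hcon]
    rfl
  | some i =>
    have hfacts := pvIndex_facts m mp r i hidx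
    have hmem : r ∈ pvTraj m 0 mp.toNat r :=
      (PySem.List.index?_isSome_iff _ _).mp (by rw [hidx]; rfl)
    have hcon : (pvTraj m 0 mp.toNat r).contains r = true := by simpa using hmem
    simp only [pvBodyB, pvTraj_zero_eq, hcon, hidx, if_true]
    rw [pvOrbB_eq m mp r i hfacts.1]

-- the two record paths agree when r is its own cycle's minimum
theorem pvRecord_agree (m mp : Int) (hm : 2 ≤ m) (hme : (2:Int) ∣ m) (r : Int)
    (hr : 1 ≤ r ∧ r < m ∧ r % 2 = 1) (d : PySem.Dict Int (List (List Int)))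
    (hInv : pvInv m mp d r) (i : Nat)
    (hmin : PySem.List.min? (pvOrb m (i + 1) r) (fun v => v) = some r) :
    pvRecordA d ((i + 1 : Nat) : Int) (pvOrb m (i + 1) r)
      = (d.setdefault ((i:Int) + 1) []).insert ((i:Int) + 1)
          ((d.setdefault ((i:Int) + 1) []).getD ((i:Int) + 1) [] ++ [pvOrb m (i + 1) r]) := by
  have hlow : ∀ y ∈ pvOrb m (i + 1) r, r ≤ y := fun y hy => PySem.List.min?_isMin hmin y hy
  have hcast : ((i + 1 : Nat) : Int) = (i:Int) + 1 := by push_cast; ring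
  have hany : ∀ (cur : List (List Int)), cur = d.getD ((i:Int) + 1) [] →
      cur.any (fun c => pvSetEq c (pvOrb m (i + 1) r)) = false := by
    intro cur hcur
    rw [List.any_eq_false]
    rintro c hc
    rw [hcur] at hc
    obtain ⟨s, p', hrep, hslt, hpI, hceq⟩ := hInv.1 _ c hc
    have hp' : p' = i + 1 := by exact_mod_cast hpI.symm
    subst hp' hceq
    intro hseteq
    have hsets := (pvSetEq_iff _ _).mp hseteq
    obtain ⟨h1s, -, -, hp1, -, -, -, hminc⟩ := hrep
    have hsmem : s ∈ pvOrb m (i + 1) s := pvOrb_self_mem m i s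
    have hsr : r ≤ s := hlow s ((hsets s).mp hsmem)
    have hrmem : r ∈ pvOrb m (i + 1) s := (hsets r).mpr (pvOrb_self_mem m i r)
    obtain ⟨j1, hj1, hj1eq⟩ := (mem_pvOrb m (i + 1) s r).mp hrmem
    have hrs : s ≤ r := by
      have := hminc j1 hj1
      omega
    omega
  rw [hcast]
  by_cases hc : d.contains ((i:Int) + 1) = true
  · simp [pvRecordA, hc, hany _ rfl, PySem.Dict.setdefault_of_contains d _ hc]
  · have hcf : d.contains ((i:Int) + 1) = false := by simpa using hc
    have hnil : (d.insert ((i:Int) + 1) ([] : List (List Int))).getD ((i:Int) + 1) [] = [] := by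
      rw [PySem.Dict.getD_insert]
      simp
    simp [pvRecordA, hcf, PySem.Dict.setdefault_of_not_contains d _ hcf, hnil]

-- when r is not its cycle's minimum, A's frozenset scan finds the stored cycle and drops it
theorem pvRecord_drop (m mp : Int) (hm : 2 ≤ m) (hme : (2:Int) ∣ m) (r : Int)
    (hr : 1 ≤ r ∧ r < m ∧ r % 2 = 1) (d : PySem.Dict Int (List (List Int)))
    (hInv : pvInv m mp d r) (i : Nat)
    (hlen : i < mp.toNat) (hret : (pvF m)^[i + 1] r = r)
    (hminimal : ∀ q : Nat, 1 ≤ q → q < i + 1 → (pvF m)^[q] r ≠ r)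
    (hmin : ¬ PySem.List.min? (pvOrb m (i + 1) r) (fun v => v) = some r) :
    pvRecordA d ((i + 1 : Nat) : Int) (pvOrb m (i + 1) r) = d := by
  have hcast : ((i + 1 : Nat) : Int) = (i:Int) + 1 := by push_cast; ring
  -- the orbit's true minimum x
  obtain ⟨x, hx⟩ : ∃ x, PySem.List.min? (pvOrb m (i + 1) r) (fun v => v) = some x := by
    cases hx0 : PySem.List.min? (pvOrb m (i + 1) r) (fun v => v) with
    | none => exact absurd ((PySem.List.min?_eq_none_iff _ _).mp hx0) (pvOrb_ne_nil m i r)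
    | some x => exact ⟨x, rfl⟩
  have hxmem := PySem.List.min?_mem hx
  obtain ⟨j0, hj0, hj0eq⟩ := (mem_pvOrb m (i + 1) r x).mp hxmem
  have hxlow : ∀ y ∈ pvOrb m (i + 1) r, x ≤ y := fun y hy => PySem.List.min?_isMin hx y hy
  have hxr : x < r := by
    have hle : x ≤ r := hxlow r (pvOrb_self_mem m i r)
    have hne : x ≠ r := fun hxeq => hmin (hxeq ▸ hx)
    omega
  have hrep : pvRep m mp x (i + 1) :=
    pvRep_of_min m mp hm hme r hr i hlen hret hminimal x j0 hj0 hj0eq.symm hxlow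
  have horb : pvOrb m (i + 1) x ∈ d.getD ((i + 1 : Nat) : Int) [] := hInv.2 x (i + 1) hrep hxr
  have hsets : ∀ y : Int, y ∈ pvOrb m (i + 1) x ↔ y ∈ pvOrb m (i + 1) r :=
    pvOrb_set_eq m r x (i + 1) j0 (by omega) hj0 hret hj0eq.symm
  have hcontains : d.contains ((i + 1 : Nat) : Int) = true := by
    by_contra hc
    have : d.getD ((i + 1 : Nat) : Int) ([] : List (List Int)) = [] :=
      PySem.Dict.getD_of_not_contains d _ (by simpa using hc)
    rw [this] at horb
    exact absurd horb (List.not_mem_nil)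
  have hany : (d.getD ((i + 1 : Nat) : Int) []).any
      (fun c => pvSetEq c (pvOrb m (i + 1) r)) = true := by
    rw [List.any_eq_true]
    exact ⟨pvOrb m (i + 1) x, horb, (pvSetEq_iff _ _).mpr hsets⟩
  have hcontains' : d.contains ((i:Int) + 1) = true := by rw [← hcast]; exact hcontains
  have hany' : ((d.getD ((i:Int) + 1) []).any fun c => pvSetEq c (pvOrb m (i + 1) r)) = true := by
    rw [← hcast]; exact hany
  simp only [pvRecordA, hcast]
  rw [if_pos hcontains', if_pos hany']

-- ===== per-residue body equality and invariant preservation =====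
theorem pvBody_eq (m mp : Int) (hm : 2 ≤ m) (hme : (2:Int) ∣ m) (r : Int)
    (hr : 1 ≤ r ∧ r < m ∧ r % 2 = 1) (d : PySem.Dict Int (List (List Int)))
    (hInv : pvInv m mp d r) :
    pvLoopA m r (PySem.List.pyRange 1 (mp + 1) 1) r [r] d = pvBodyB m mp d r := by
  have hA := pvLoopA_char m mp hm hme r hr mp.toNat 0 d (by omega)
  simp only [Nat.cast_zero, zero_add, Nat.zero_add, Function.iterate_zero, id_eq,
    pvOrb_one] at hA
  rw [hA, pvBodyB_char]
  cases hidx : PySem.List.index? (pvTraj m 0 mp.toNat r) r with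
  | none => rfl
  | some i =>
    have hfacts := pvIndex_facts m mp r i hidx
    show pvRecordA d ((i + 1 : Nat) : Int) (pvOrb m (i + 1) r)
        = if PySem.List.min? (pvOrb m (i + 1) r) (fun v => v) = some r then
            (d.setdefault ((i:Int) + 1) []).insert ((i:Int) + 1)
              ((d.setdefault ((i:Int) + 1) []).getD ((i:Int) + 1) [] ++ [pvOrb m (i + 1) r])
          else d
    by_cases hmin : PySem.List.min? (pvOrb m (i + 1) r) (fun v => v) = some r
    · rw [if_pos hmin]
      exact pvRecord_agree m mp hm hme r hr d hInv i hmin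
    · rw [if_neg hmin]
      exact pvRecord_drop m mp hm hme r hr d hInv i hfacts.1 hfacts.2.1 hfacts.2.2 hmin

theorem pvInv_step (m mp : Int) (hm : 2 ≤ m) (hme : (2:Int) ∣ m) (r : Int)
    (hr : 1 ≤ r ∧ r < m ∧ r % 2 = 1) (d : PySem.Dict Int (List (List Int)))
    (hInv : pvInv m mp d r) :
    pvInv m mp (pvBodyB m mp d r) (r + 2) := by
  rw [pvBodyB_char]
  -- a representative strictly below r + 2 and odd is either below r or r itself
  have hside : ∀ (s : Int) (p : Nat), pvRep m mp s p → s < r + 2 → s ≠ r → s < r := by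
    intro s p hrep hs hne
    have h1 := hrep.1
    have hodd := hrep.2.2.1
    have hro := hr.2.2
    omega
  cases hidx : PySem.List.index? (pvTraj m 0 mp.toNat r) r with
  | none =>
    -- no return within max_period: r is no representative, the dict is unchanged
    have hnorep : ∀ p : Nat, ¬ pvRep m mp r p := by
      intro p hrep
      obtain ⟨-, -, -, hp1, hpm, hfix, -, -⟩ := hrep
      have hmem : r ∈ pvTraj m 0 mp.toNat r := by
        rw [mem_pvTraj]
        exact ⟨p - 1, by omega, by rw [show p - 1 + 1 = p by omega]; exact hfix⟩
      exact absurd hmem ((PySem.List.index?_eq_none_iff _ _).mp hidx)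
    refine ⟨fun pI c hc => ?_, fun s p hrep hs => ?_⟩
    · obtain ⟨s, p, h1, h2, h3, h4⟩ := hInv.1 pI c hc
      exact ⟨s, p, h1, by omega, h3, h4⟩
    · rcases eq_or_ne s r with rfl | hne
      · exact absurd hrep (hnorep p)
      · exact hInv.2 s p hrep (hside s p hrep hs hne)
  | some i =>
    have hfacts := pvIndex_facts m mp r i hidx
    show pvInv m mp
        (if PySem.List.min? (pvOrb m (i + 1) r) (fun v => v) = some r then
          (d.setdefault ((i:Int) + 1) []).insert ((i:Int) + 1)
            ((d.setdefault ((i:Int) + 1) []).getD ((i:Int) + 1) [] ++ [pvOrb m (i + 1) r])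
        else d) (r + 2)
    by_cases hmin : PySem.List.min? (pvOrb m (i + 1) r) (fun v => v) = some r
    · rw [if_pos hmin]
      have hlow : ∀ y ∈ pvOrb m (i + 1) r, r ≤ y :=
        fun y hy => PySem.List.min?_isMin hmin y hy
      have hrepr : pvRep m mp r (i + 1) :=
        pvRep_of_min m mp hm hme r hr i hfacts.1 hfacts.2.1 hfacts.2.2 r 0 (by omega)
          (Function.iterate_zero_apply (pvF m) r).symm hlow
      have hcur : (d.setdefault ((i:Int) + 1) []).getD ((i:Int) + 1) []
          = d.getD ((i:Int) + 1) [] := PySem.Dict.getD_setdefault_self d _ _ _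
      have hgetD : ∀ pI : Int,
          ((d.setdefault ((i:Int) + 1) []).insert ((i:Int) + 1)
            ((d.setdefault ((i:Int) + 1) []).getD ((i:Int) + 1) [] ++ [pvOrb m (i + 1) r])).getD pI []
          = if pI = (i:Int) + 1 then d.getD ((i:Int) + 1) [] ++ [pvOrb m (i + 1) r]
            else d.getD pI [] := by
        intro pI
        rw [PySem.Dict.getD_insert, hcur]
        by_cases hpe : pI = (i:Int) + 1
        · rw [if_pos hpe, if_pos hpe]
        · rw [if_neg hpe, if_neg hpe, PySem.Dict.getD_eq_get?_getD,
              PySem.Dict.get?_setdefault_of_ne d _ hpe, ← PySem.Dict.getD_eq_get?_getD]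
      refine ⟨fun pI c hc => ?_, fun s p hrep hs => ?_⟩
      · rw [hgetD] at hc
        by_cases hpe : pI = (i:Int) + 1
        · rw [if_pos hpe] at hc
          rcases List.mem_append.mp hc with hold | hnew
          · obtain ⟨s, p, h1, h2, h3, h4⟩ := hInv.1 _ c hold
            exact ⟨s, p, h1, by omega, by rw [hpe, h3], h4⟩
          · refine ⟨r, i + 1, hrepr, by omega, ?_, List.mem_singleton.mp hnew⟩
            rw [hpe]; push_cast; ring
        · rw [if_neg hpe] at hc
          obtain ⟨s, p, h1, h2, h3, h4⟩ := hInv.1 _ c hc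
          exact ⟨s, p, h1, by omega, h3, h4⟩
      · rw [hgetD]
        rcases eq_or_ne s r with rfl | hne
        · have hp : p = i + 1 := pvRep_unique m mp s i p hfacts.2.1 hfacts.2.2 hrep
          subst hp
          rw [if_pos (by push_cast; ring)]
          exact List.mem_append_right _ (List.mem_singleton.mpr rfl)
        · have hold := hInv.2 s p hrep (hside s p hrep hs hne)
          by_cases hpe : ((p : Nat) : Int) = (i:Int) + 1
          · rw [if_pos hpe]
            exact List.mem_append_left _ (hpe ▸ hold)
          · rw [if_neg hpe]
            exact hold
    · rw [if_neg hmin]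
      -- r returns but is not its cycle's minimum: not a representative, dict unchanged
      have hnorep : ∀ p : Nat, ¬ pvRep m mp r p := by
        intro p hrep
        have hp : p = i + 1 := pvRep_unique m mp r i p hfacts.2.1 hfacts.2.2 hrep
        subst hp
        obtain ⟨-, -, -, -, -, -, -, hminc⟩ := hrep
        refine hmin ?_
        rw [pvOrb_cons, pvMin_cons_iff]
        intro y hy
        obtain ⟨j, hj, hjeq⟩ := List.mem_map.mp hy
        rw [List.mem_range] at hj
        rw [← hjeq]
        exact hminc (j + 1) (by omega)
      refine ⟨fun pI c hc => ?_, fun s p hrep hs => ?_⟩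
      · obtain ⟨s, p, h1, h2, h3, h4⟩ := hInv.1 pI c hc
        exact ⟨s, p, h1, by omega, h3, h4⟩
      · rcases eq_or_ne s r with rfl | hne
        · exact absurd hrep (hnorep p)
        · exact hInv.2 s p hrep (hside s p hrep hs hne)

theorem pvInv_empty (m mp : Int) : pvInv m mp PySem.Dict.empty 1 := by
  constructor
  · intro pI c hc
    simp [PySem.Dict.getD_empty] at hc
  · intro s p hrep hs
    have h1 := hrep.1
    omega

-- the two folds over the odd residues agree
theorem pvFold_eq (m mp : Int) (hm : 2 ≤ m) (hme : (2:Int) ∣ m) :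
    ∀ (n : Nat) (a : Int) (d : PySem.Dict Int (List (List Int))),
      (m - a).toNat ≤ n → 1 ≤ a → a % 2 = 1 → pvInv m mp d a →
      (PySem.List.pyRange a m 2).foldl
          (fun periodic r => pvLoopA m r (PySem.List.pyRange 1 (mp + 1) 1) r [r] periodic) d
        = (PySem.List.pyRange a m 2).foldl (pvBodyB m mp) d := by
  intro n
  induction n with
  | zero =>
    intro a d hn ha1 hao hInv
    rw [pvRange2_nil a m (by omega)]
    rfl
  | succ n ih =>
    intro a d hn ha1 hao hInv
    by_cases ham : a < m
    · rw [pvRange2_cons a m ham]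
      simp only [List.foldl_cons]
      rw [pvBody_eq m mp hm hme a ⟨ha1, ham, hao⟩ d hInv]
      have hstep := pvInv_step m mp hm hme a ⟨ha1, ham, hao⟩ d hInv
      have h1 : (m - (a + 2)).toNat ≤ n := by omega
      have h2 : 1 ≤ a + 2 := by omega
      have h3 : (a + 2) % 2 = 1 := by omega
      exact ih (a + 2) (pvBodyB m mp d a) h1 h2 h3 hstep
    · rw [pvRange2_nil a m (by omega)]
      rfl

-- ===== VERDICT (by name: the statement is the Claim_ definition above) =====
theorem find_all_periodic_mod_spec : Claim_equal_find_all_periodic_mod := by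
  intro k max_period _hdom hpre
  unfold Spec_find_all_periodic_mod find_all_periodic_mod find_all_periodic_mod_alt
  simp only
  congr 1
  by_cases hk : k.toNat = 0
  · rw [hk]
    norm_num
    rw [pvRange2_nil 1 1 (le_refl 1)]
    rfl
  · have hm : (2:Int) ≤ (2:Int) ^ k.toNat := by
      calc (2:Int) = 2 ^ 1 := by norm_num
        _ ≤ 2 ^ k.toNat := by
          apply pow_le_pow_right₀ (by norm_num)
          omega
    have hme : (2:Int) ∣ (2:Int) ^ k.toNat := dvd_pow_self 2 hk
    exact pvFold_eq ((2:Int) ^ k.toNat) max_period hm hme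
      ((2:Int) ^ k.toNat - 1).toNat 1 PySem.Dict.empty (le_refl _) (by norm_num) (by norm_num)
      (pvInv_empty _ _)
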